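-- pv_equiv track=rewrite | github.com/flakkaxantuy/shift-recommendation | routes/shift_routes.py | loop_pattern
-- ===== SOURCE A (Python) =====
-- def loop_pattern(start_index, pattern, times):
--     result = []
--     pattern_length = len(pattern)
--
--     if pattern_length != 0:
--         for i in range(times+1):
--             current_index = (start_index + i) % pattern_length
--             result.append(pattern[current_index])
--     else:
--         return None
--
--     return result
-- ===== SOURCE B (Python) =====
-- def loop_pattern(start_index, pattern, times):
--     pattern = list(pattern)
--     pattern_length = len(pattern)
--     if pattern_length == 0:
--         return None
--     k = start_index % pattern_length
--     rotated = pattern[k:] + pattern[:k]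
--     n = max(0, times + 1)
--     return (rotated * (n // pattern_length + 1))[:n]
-- ===== Notes on version B (the rewrite author's own statement) =====
-- stated objective: alternative
-- what changed: B replaces the per-index modular loop by a rotate-tile-truncate construction: rotate the pattern by start_index % len once, replicate the rotated cycle, and slice the first max(0, times+1) elements.
import Mathlib
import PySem

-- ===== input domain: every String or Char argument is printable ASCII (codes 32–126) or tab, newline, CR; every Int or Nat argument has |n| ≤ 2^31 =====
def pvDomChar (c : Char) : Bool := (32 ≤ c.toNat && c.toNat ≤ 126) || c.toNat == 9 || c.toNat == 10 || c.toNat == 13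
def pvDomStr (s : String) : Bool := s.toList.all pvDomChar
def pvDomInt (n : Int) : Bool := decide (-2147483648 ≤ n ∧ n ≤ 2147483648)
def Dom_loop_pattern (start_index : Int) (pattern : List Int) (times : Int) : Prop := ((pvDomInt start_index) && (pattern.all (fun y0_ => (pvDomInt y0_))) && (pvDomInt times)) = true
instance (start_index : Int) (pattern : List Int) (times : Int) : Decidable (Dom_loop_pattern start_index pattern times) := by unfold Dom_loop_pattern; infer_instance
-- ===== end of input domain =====

-- B builds the answer by rotating the pattern once, tiling the rotated cycle and truncating,
-- instead of A's per-index modular lookups; objective: alternative decomposition, same cost.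

-- ===== PORT A =====
def loop_pattern (start_index : Int) (pattern : List Int) (times : Int) : Option (List Int) :=
  let result : List Int := []
  let pattern_length : Int := pattern.length
  if pattern_length ≠ 0 then
    some ((PySem.List.pyRange 0 (times + 1) 1).foldl
      (fun result i =>
        let current_index := PySem.Int.mod (start_index + i) pattern_length
        -- index is always in range (0 ≤ current_index < pattern_length), so the default is never used
        result ++ [PySem.List.pyGetD pattern current_index 0]) result)
  else
    none

-- ===== PORT B =====
def loop_pattern_alt (start_index : Int) (pattern : List Int) (times : Int) : Option (List Int) :=
  let pattern_length : Int := pattern.length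
  if pattern_length = 0 then
    none
  else
    let k := PySem.Int.mod start_index pattern_length
    let rotated := PySem.List.slice pattern (some k) none ++ PySem.List.slice pattern none (some k)
    let n := max 0 (times + 1)
    some (PySem.List.slice ((List.replicate (PySem.Int.floordiv n pattern_length + 1).toNat rotated).flatten) none (some n))

-- ===== PRECONDITION & SPEC =====
def Spec_loop_pattern (start_index : Int) (pattern : List Int) (times : Int) (out : Option (List Int)) : Prop := out = loop_pattern_alt start_index pattern times
instance (start_index : Int) (pattern : List Int) (times : Int) (out : Option (List Int)) : Decidable (Spec_loop_pattern start_index pattern times out) := by unfold Spec_loop_pattern; infer_instance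

-- ===== CLAIM (what is proved, stated in full; the proofs are below) =====
def Claim_equal_loop_pattern : Prop := ∀ (start_index : Int) (pattern : List Int) (times : Int), Dom_loop_pattern start_index pattern times → Spec_loop_pattern start_index pattern times (loop_pattern start_index pattern times)

-- ===== LEMMAS AND PROOFS =====

lemma flatten_replicate_getElem? (xs : List Int) (m j : Nat) (hj : j < m * xs.length) :
    (List.replicate m xs).flatten[j]? = xs[j % xs.length]? := by
  induction m generalizing j with
  | zero => simp at hj
  | succ m ih =>
    rw [List.replicate_succ, List.flatten_cons]
    by_cases h : j < xs.length
    · rw [List.getElem?_append_left h, Nat.mod_eq_of_lt h]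
    · push_neg at h
      rw [List.getElem?_append_right h, ih _ (by rw [Nat.add_mul, Nat.one_mul] at hj; omega),
        Nat.mod_eq_sub_mod h]

lemma rotated_getElem? (xs : List Int) (k r : Nat) (hk : k ≤ xs.length) (hr : r < xs.length) :
    (xs.drop k ++ xs.take k)[r]? = xs[(k + r) % xs.length]? := by
  by_cases h : r < xs.length - k
  · rw [List.getElem?_append_left (by simpa using h), List.getElem?_drop,
      Nat.mod_eq_of_lt (by omega)]
  · push_neg at h
    rw [List.getElem?_append_right (by simpa using h)]
    have h2 : (k + r) % xs.length = k + r - xs.length := by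
      rw [Nat.mod_eq_sub_mod (by omega), Nat.mod_eq_of_lt (by omega)]
    rw [h2]
    simp only [List.length_drop]
    rw [List.getElem?_take_of_lt (by omega)]
    congr 1; omega

lemma mod_shift (s : Int) (L j : Nat) (hL : 0 < L) :
    (PySem.Int.mod (s + (j : Int)) (L : Int)).toNat = ((PySem.Int.mod s (L : Int)).toNat + j) % L := by
  have hL' : (0:Int) < L := by exact_mod_cast hL
  rw [PySem.Int.mod_eq_emod_of_pos hL', PySem.Int.mod_eq_emod_of_pos hL']
  have h1 : 0 ≤ s % (L:Int) := Int.emod_nonneg _ (by omega)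
  have h3 : (s + (j:Int)) % (L:Int) = ((s % (L:Int)) + (j:Int)) % (L:Int) :=
    (Int.emod_add_emod s (L:Int) (j:Int)).symm
  have h5 : ∀ k : Nat, ((k:Int) + (j:Int)) % (L:Int) = (((k + j) % L : Nat) : Int) := by
    intro k; push_cast; ring_nf
  obtain ⟨k, hk⟩ : ∃ k : Nat, s % (L:Int) = (k : Int) := ⟨(s % (L:Int)).toNat, by omega⟩
  rw [h3, hk, h5, Int.toNat_natCast, Int.toNat_natCast]

theorem main (s : Int) (pattern : List Int) (times : Int) (hp : pattern ≠ []) :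
    (PySem.List.pyRange 0 (times + 1) 1).foldl
      (fun result i => result ++ [PySem.List.pyGetD pattern (PySem.Int.mod (s + i) (pattern.length : Int)) 0]) [] =
    PySem.List.slice ((List.replicate
        (PySem.Int.floordiv (max 0 (times + 1)) (pattern.length : Int) + 1).toNat
        (PySem.List.slice pattern (some (PySem.Int.mod s (pattern.length : Int))) none ++
         PySem.List.slice pattern none (some (PySem.Int.mod s (pattern.length : Int))))).flatten)
      none (some (max 0 (times + 1))) := by
  have hL : 0 < pattern.length := List.length_pos_iff.mpr hp
  have hL' : (0:Int) < (pattern.length : Int) := by exact_mod_cast hL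
  set L := pattern.length with hLdef
  -- name the rotation amount
  have hk0 : 0 ≤ PySem.Int.mod s (L : Int) := by
    rw [PySem.Int.mod_eq_emod_of_pos hL']; exact Int.emod_nonneg _ (by omega)
  have hklt : PySem.Int.mod s (L : Int) < L := by
    rw [PySem.Int.mod_eq_emod_of_pos hL']; exact Int.emod_lt_of_pos _ hL'
  obtain ⟨k, hk⟩ : ∃ k : Nat, PySem.Int.mod s (L : Int) = (k : Int) :=
    ⟨(PySem.Int.mod s (L : Int)).toNat, by omega⟩
  have hkL : k ≤ L := by omega
  -- name n' = number of elements produced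
  obtain ⟨n', hn⟩ : ∃ n' : Nat, max 0 (times + 1) = (n' : Int) :=
    ⟨(max 0 (times + 1)).toNat, by omega⟩
  have htn : (times + 1).toNat = n' := by omega
  -- fold = map over range
  rw [PySem.List.foldl_append_singleton_eq_map]
  have hrange : PySem.List.pyRange 0 (times + 1) 1 = (List.range n').map (fun i : Nat => (i : Int)) := by
    by_cases ht : 0 ≤ times + 1
    · have h : times + 1 = (n' : Int) := by omega
      rw [h, PySem.List.pyRange_zero_natCast]
    · have hn0 : n' = 0 := by omega
      subst hn0
      simp [PySem.List.pyRange]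
      omega
  rw [hrange, List.map_map, List.nil_append, hn, hk, PySem.List.slice_to_natCast,
    PySem.List.slice_from_natCast, PySem.List.slice_to_natCast]
  have hm : (PySem.Int.floordiv (n' : Int) (L : Int) + 1).toNat = n' / L + 1 := by
    rw [PySem.Int.floordiv_natCast, ← Nat.cast_add_one, Int.toNat_natCast]
  rw [hm]
  have hlen : (pattern.drop k ++ pattern.take k).length = L := by
    simp only [List.length_append, List.length_drop, List.length_take]
    omega
  have hflatlen : n' < (n' / L + 1) * L := by
    have h1 : L * (n' / L) + n' % L = n' := Nat.div_add_mod n' L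
    have h2 : n' % L < L := Nat.mod_lt n' hL
    have h3 : (n' / L + 1) * L = L * (n' / L) + L := by ring
    rw [h3]
    omega
  apply List.ext_getElem?
  intro i
  by_cases hi : i < n'
  · rw [List.getElem?_take_of_lt hi,
      flatten_replicate_getElem? _ _ _ (by rw [hlen]; omega),
      hlen, rotated_getElem? pattern k (i % L) hkL (Nat.mod_lt _ hL),
      Nat.add_mod_mod]
    rw [List.getElem?_map, List.getElem?_range hi]
    simp only [Option.map_some, Function.comp_apply]
    have hms := mod_shift s L i hL
    rw [hk, Int.toNat_natCast] at hms
    rw [PySem.List.pyGetD_eq_getElem pattern 0 (by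
        rw [PySem.Int.mod_eq_emod_of_pos hL']; exact Int.emod_nonneg _ (by omega))
      (by rw [PySem.Int.mod_eq_emod_of_pos hL']; exact Int.emod_lt_of_pos _ hL')]
    simp only [hms]
    rw [List.getElem?_eq_getElem (Nat.mod_lt _ hL)]
  · rw [List.getElem?_eq_none (by simp only [List.length_map, List.length_range]; omega),
      List.getElem?_eq_none (by
        have := List.length_take_le n' ((List.replicate (n' / L + 1) (pattern.drop k ++ pattern.take k)).flatten)
        omega)]

-- ===== VERDICT (by name: the statement is the Claim_ definition above) =====
theorem loop_pattern_spec : Claim_equal_loop_pattern := by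
  intro s pattern times _
  unfold Spec_loop_pattern
  by_cases hp : pattern = []
  · subst hp
    simp [loop_pattern, loop_pattern_alt]
  · have hne : (pattern.length : Int) ≠ 0 := by
      have : 0 < pattern.length := List.length_pos_iff.mpr hp
      omega
    simp only [loop_pattern, loop_pattern_alt, if_pos hne, if_neg (by exact hne)]
    exact congrArg some (main s pattern times hp)
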